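-- pv_equiv track=rewrite | github.com/Staryo40/Tucil1_Stima_2024 | solution.py | sequenceValue
-- ===== SOURCE A (Python) =====
-- from typing import List, Optional, Tuple
--
-- def sequenceValue(seq: list[str], targetSeqList: List[Tuple[List[str], int]]) -> int:
--     value = 0
--
--     # Iterate through each target sequence and its corresponding value
--     for tarSeq, seqValue in targetSeqList:
--         count = 0
--
--         for i in range(len(seq) - len(tarSeq) + 1):
--             if seq[i:i+len(tarSeq)] == tarSeq:
--                 count += 1
--
--         value += seqValue * count
--
--     return value
-- ===== SOURCE B (Python) =====
-- def sequenceValue(seq, targetSeqList):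
--     # Hash-index algorithm: for each DISTINCT pattern length, make ONE pass over seq
--     # building a counter of all windows of that length; then each pattern's count is
--     # a single dict lookup. No per-pattern scan of seq.
--     n = len(seq)
--     counts = {}
--     for m in dict.fromkeys(len(pat) for pat, _ in targetSeqList):
--         for i in range(n - m + 1):
--             w = tuple(seq[i:i + m])
--             counts[w] = counts.get(w, 0) + 1
--     return sum(v * counts.get(tuple(pat), 0) for pat, v in targetSeqList)
-- ===== Notes on version B (the rewrite author's own statement) =====
-- stated objective: faster
-- what changed: B replaces A's per-pattern scan of seq by a hash index: for each distinct pattern length it makes one pass over seq building a dict counting every window of that length, then each pattern's occurrence count is a single dict lookup.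
import Mathlib
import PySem

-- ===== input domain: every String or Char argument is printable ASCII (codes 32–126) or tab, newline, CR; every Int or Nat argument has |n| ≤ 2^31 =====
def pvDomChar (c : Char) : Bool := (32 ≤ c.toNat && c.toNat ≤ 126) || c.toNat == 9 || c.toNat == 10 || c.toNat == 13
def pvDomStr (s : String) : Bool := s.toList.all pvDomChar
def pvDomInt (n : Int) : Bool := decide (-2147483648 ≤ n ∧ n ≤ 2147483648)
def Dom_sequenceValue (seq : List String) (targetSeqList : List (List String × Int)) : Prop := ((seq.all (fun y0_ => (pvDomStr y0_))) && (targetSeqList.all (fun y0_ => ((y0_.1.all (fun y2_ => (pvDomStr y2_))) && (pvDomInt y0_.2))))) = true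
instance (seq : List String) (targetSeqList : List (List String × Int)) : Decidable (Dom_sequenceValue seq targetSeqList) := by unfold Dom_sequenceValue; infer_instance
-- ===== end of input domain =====

-- B replaces A's per-pattern scan of seq by a hash index: one counter of all windows per DISTINCT
-- pattern length, then each pattern's count is a single dict lookup; objective: faster per-pattern.

-- ===== PORT A =====
def sequenceValue (seq : List String) (targetSeqList : List (List String × Int)) : Int :=
  -- value = 0; for tarSeq, seqValue in targetSeqList: count occurrences by slicing; value += seqValue * count
  targetSeqList.foldl
    (fun value p =>
      let count : Int :=
        (PySem.List.pyRange 0 ((seq.length : Int) - (p.1.length : Int) + 1) 1).foldl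
          (fun count i =>
            if PySem.List.slice seq (some i) (some (i + (p.1.length : Int))) = p.1
            then count + 1 else count) 0
      value + p.2 * count) 0

-- ===== PORT B =====
def sequenceValue_alt (seq : List String) (targetSeqList : List (List String × Int)) : Int :=
  -- counts = {}; for m in dict.fromkeys(len(pat) for pat,_ in ts): for i in range(n-m+1):
  --   w = tuple(seq[i:i+m]); counts[w] = counts.get(w, 0) + 1
  -- return sum(v * counts.get(tuple(pat), 0) for pat, v in ts)
  let counts : PySem.Dict (List String) Int :=
    (PySem.List.dedup (targetSeqList.map (fun p => p.1.length))).foldl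
      (fun counts (m : Nat) =>
        (PySem.List.pyRange 0 ((seq.length : Int) - (m : Int) + 1) 1).foldl
          (fun counts i =>
            let w := PySem.List.slice seq (some i) (some (i + (m : Int)))
            counts.insert w (counts.getD w 0 + 1))
          counts)
      PySem.Dict.empty
  (targetSeqList.map (fun p => p.2 * counts.getD p.1 0)).sum

-- ===== PRECONDITION & SPEC =====
def Spec_sequenceValue (seq : List String) (targetSeqList : List (List String × Int)) (out : Int) : Prop := out = sequenceValue_alt seq targetSeqList
instance (seq : List String) (targetSeqList : List (List String × Int)) (out : Int) : Decidable (Spec_sequenceValue seq targetSeqList out) := by unfold Spec_sequenceValue; infer_instance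

-- ===== CLAIM (what is proved, stated in full; the proofs are below) =====
def Claim_equal_sequenceValue : Prop := ∀ (seq : List String) (targetSeqList : List (List String × Int)), Dom_sequenceValue seq targetSeqList → Spec_sequenceValue seq targetSeqList (sequenceValue seq targetSeqList)

-- ===== LEMMAS AND PROOFS =====

-- the list of all windows of length m of seq, in start-position order
def pvW (seq : List String) (m : Nat) : List (List String) :=
  (List.range (seq.length + 1 - m)).map (fun k => (seq.drop k).take m)

lemma pvW_eq (seq : List String) (m : Nat) :
    (PySem.List.pyRange 0 ((seq.length : Int) - (m : Int) + 1) 1).map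
      (fun i => PySem.List.slice seq (some i) (some (i + (m : Int)))) = pvW seq m := by
  rw [PySem.List.pyRange_one, List.map_map, pvW]
  have h : (((seq.length : Int) - (m : Int) + 1) - 0).toNat = seq.length + 1 - m := by omega
  rw [h]
  apply List.map_congr_left
  intro k _
  simp only [Function.comp, zero_add]
  rw [PySem.List.slice_natCast_add]

lemma length_mem_pvW (seq : List String) (m : Nat) (w : List String) (hw : w ∈ pvW seq m) :
    w.length = m := by
  simp only [pvW, List.mem_map, List.mem_range] at hw
  obtain ⟨k, hk, rfl⟩ := hw
  simp [List.length_take, List.length_drop]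
  omega

lemma count_pvW_ne (seq : List String) (m : Nat) (p : List String) (h : p.length ≠ m) :
    (pvW seq m).count p = 0 := by
  rw [List.count_eq_zero]
  intro hp
  exact h (length_mem_pvW seq m p hp)

-- A's inner loop computes the count of p among the windows of its own length
lemma countA_eq (seq p : List String) :
    ((PySem.List.pyRange 0 ((seq.length : Int) - (p.length : Int) + 1) 1).foldl
      (fun count i =>
        if PySem.List.slice seq (some i) (some (i + (p.length : Int))) = p
        then count + 1 else count) (0 : Int))
    = ((pvW seq p.length).count p : Int) := by
  rw [show (fun (count : Int) i =>
        if PySem.List.slice seq (some i) (some (i + (p.length : Int))) = p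
        then count + 1 else count)
      = (fun (count : Int) i =>
        if (fun i => decide (PySem.List.slice seq (some i) (some (i + (p.length : Int))) = p)) i = true
        then count + 1 else count) from by
    funext c i
    by_cases h : PySem.List.slice seq (some i) (some (i + (p.length : Int))) = p <;> simp [h]]
  rw [PySem.List.foldl_count_if, zero_add]
  rw [← pvW_eq seq p.length, List.count_eq_countP, List.countP_map]
  congr 1
  apply List.countP_congr
  intro i _
  simp only [Function.comp]
  by_cases h : PySem.List.slice seq (some i) (some (i + (p.length : Int))) = p <;> simp [h]

-- the counter B builds: looking up p gives the total count of p over all kept lengths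
lemma counts_getD (seq : List String) (L : List Nat) (d : PySem.Dict (List String) Int)
    (p : List String) :
    ((L.foldl
      (fun counts (m : Nat) =>
        (PySem.List.pyRange 0 ((seq.length : Int) - (m : Int) + 1) 1).foldl
          (fun counts i =>
            let w := PySem.List.slice seq (some i) (some (i + (m : Int)))
            counts.insert w (counts.getD w 0 + 1))
          counts)
      d).getD p 0)
    = d.getD p 0 + ((L.map (fun m => ((pvW seq m).count p : Int))).sum) := by
  induction L generalizing d with
  | nil => simp
  | cons m L ih =>
    simp only [List.foldl_cons, List.map_cons, List.sum_cons]
    rw [ih]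
    have hinner :
        ((PySem.List.pyRange 0 ((seq.length : Int) - (m : Int) + 1) 1).foldl
          (fun counts i =>
            let w := PySem.List.slice seq (some i) (some (i + (m : Int)))
            counts.insert w (counts.getD w 0 + 1)) d).getD p 0
        = d.getD p 0 + ((pvW seq m).count p : Int) := by
      calc ((PySem.List.pyRange 0 ((seq.length : Int) - (m : Int) + 1) 1).foldl
              (fun counts i =>
                let w := PySem.List.slice seq (some i) (some (i + (m : Int)))
                counts.insert w (counts.getD w 0 + 1)) d).getD p 0
          = ((pvW seq m).foldl
              (fun (counts : PySem.Dict (List String) Int) w =>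
                counts.insert w (counts.getD w 0 + 1)) d).getD p 0 := by
            rw [← pvW_eq seq m, List.foldl_map]
        _ = d.getD p 0 + ((pvW seq m).count p : Int) := by
            rw [PySem.Dict.getD_foldl_insert_add_one]
    rw [hinner]
    ring

-- positions: a pattern's length is always among the deduped lengths
lemma len_mem_dedup (ts : List (List String × Int)) (p : List String × Int) (hp : p ∈ ts) :
    p.1.length ∈ PySem.List.dedup (ts.map (fun q => q.1.length)) := by
  rw [PySem.List.mem_dedup]
  exact List.mem_map_of_mem hp

-- summing counts over a Nodup list in which only m0 can contribute
lemma sum_single (L : List Nat) (m0 : Nat) (c : Nat → Int) (hnd : L.Nodup) (hm : m0 ∈ L)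
    (hz : ∀ m ∈ L, m ≠ m0 → c m = 0) :
    (L.map c).sum = c m0 := by
  induction L with
  | nil => cases hm
  | cons m L ih =>
    simp only [List.map_cons, List.sum_cons]
    rcases List.mem_cons.mp hm with rfl | hm'
    · have : (L.map c).sum = 0 := by
        rw [List.sum_eq_zero]
        intro x hx
        simp only [List.mem_map] at hx
        obtain ⟨a, ha, rfl⟩ := hx
        exact hz a (List.mem_cons_of_mem _ ha) (fun h => (List.nodup_cons.mp hnd).1 (h ▸ ha))
      rw [this]; ring
    · rw [hz m (List.mem_cons_self) (fun h => (List.nodup_cons.mp hnd).1 (h ▸ hm')),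
        ih (List.nodup_cons.mp hnd).2 hm' (fun a ha => hz a (List.mem_cons_of_mem _ ha))]
      ring

-- ===== VERDICT (by name: the statement is the Claim_ definition above) =====
theorem sequenceValue_spec : Claim_equal_sequenceValue := by
  intro seq ts _
  show sequenceValue seq ts = sequenceValue_alt seq ts
  unfold sequenceValue sequenceValue_alt
  rw [PySem.List.foldl_add, zero_add]
  apply congrArg List.sum
  apply List.map_congr_left
  intro p hp
  rw [countA_eq seq p.1, counts_getD]
  rw [PySem.Dict.getD_empty, zero_add]
  congr 1
  exact (sum_single _ p.1.length (fun m => ((pvW seq m).count p.1 : Int))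
    (PySem.List.nodup_dedup _) (len_mem_dedup ts p hp)
    (fun m _ hne => by simp [count_pvW_ne seq m p.1 (fun h => hne h.symm)])).symm
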